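-- pv_equiv track=rewrite | github.com/sh499y/sortowania | quicksort_pivoty.py | a_ksztaltna
-- ===== SOURCE A (Python) =====
-- def a_ksztaltna(n):
--     tablica = []
--     polowa = n // 2
--     for i in range(0, polowa):
--         tablica.append(i)
--     for i in range(polowa, -1, -1):
--         if len(tablica) < n:
--             tablica.append(i)
--     return tablica
-- ===== SOURCE B (Python) =====
-- def a_ksztaltna(n):
--     polowa = n // 2
--     return [i if i < polowa else 2 * polowa - i for i in range(n)]
-- ===== Notes on version B (the rewrite author's own statement) =====
-- stated objective: simpler
-- what changed: Replaces the build-then-mirror pair of loops (ascending append, then descending append under a length guard) by a single pass over range(n) that computes each element directly from its index with a closed form: the index itself below the midpoint, its mirror image above.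
import Mathlib
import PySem

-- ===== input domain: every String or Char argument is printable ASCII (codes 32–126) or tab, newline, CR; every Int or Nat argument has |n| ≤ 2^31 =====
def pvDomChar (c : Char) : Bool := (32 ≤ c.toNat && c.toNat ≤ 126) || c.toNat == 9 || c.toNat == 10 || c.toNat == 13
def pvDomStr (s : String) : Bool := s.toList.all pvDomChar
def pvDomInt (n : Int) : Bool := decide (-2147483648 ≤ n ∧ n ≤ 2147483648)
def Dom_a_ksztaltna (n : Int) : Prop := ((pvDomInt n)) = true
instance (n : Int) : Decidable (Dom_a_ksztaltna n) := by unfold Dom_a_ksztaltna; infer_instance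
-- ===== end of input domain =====

-- B builds the same "A-shaped" list in one closed-form pass over range(n) instead of A's
-- build-then-mirror pair of loops (objective: simpler).

-- ===== PORT A =====
def a_ksztaltna (n : Int) : List Int :=
  let polowa := PySem.Int.floordiv n 2
  let tablica := (PySem.List.pyRange 0 polowa 1).foldl (fun t i => t ++ [i]) []
  (PySem.List.pyRange polowa (-1) (-1)).foldl
    (fun t i => if (t.length : Int) < n then t ++ [i] else t) tablica

-- ===== PORT B =====
def a_ksztaltna_alt (n : Int) : List Int :=
  let polowa := PySem.Int.floordiv n 2
  (PySem.List.pyRange 0 n 1).map (fun i => if i < polowa then i else 2 * polowa - i)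

-- ===== PRECONDITION & SPEC =====
def Spec_a_ksztaltna (n : Int) (out : List Int) : Prop := out = a_ksztaltna_alt n
instance (n : Int) (out : List Int) : Decidable (Spec_a_ksztaltna n out) := by unfold Spec_a_ksztaltna; infer_instance

-- ===== CLAIM (what is proved, stated in full; the proofs are below) =====
def Claim_equal_a_ksztaltna : Prop := ∀ (n : Int), Dom_a_ksztaltna n → Spec_a_ksztaltna n (a_ksztaltna n)

-- ===== LEMMAS AND PROOFS =====

-- A's second loop: append each element while the length is still below n = prefix of the list.
theorem guard_foldl_take (l t : List Int) (n : Int) :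
    l.foldl (fun t i => if (t.length : Int) < n then t ++ [i] else t) t
      = t ++ l.take (n - t.length).toNat := by
  induction l generalizing t with
  | nil => simp
  | cons x xs ih =>
    simp only [List.foldl_cons]
    by_cases hlt : (t.length : Int) < n
    · rw [if_pos hlt, ih]
      have h1 : (n - ((t ++ [x]).length : Int)).toNat = (n - t.length).toNat - 1 := by
        simp; omega
      have h2 : (x :: xs).take (n - (t.length : Int)).toNat
          = x :: xs.take ((n - (t.length : Int)).toNat - 1) := by
        have heq : (n - (t.length : Int)).toNat = ((n - (t.length : Int)).toNat - 1) + 1 := by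
          omega
        conv_lhs => rw [heq]
        rw [List.take_succ_cons]
      rw [h1, h2]
      simp
    · rw [if_neg hlt, ih]
      have h0 : (n - (t.length : Int)).toNat = 0 := by omega
      rw [h0]
      simp

theorem a_ksztaltna_eq (n : Int) : a_ksztaltna n = a_ksztaltna_alt n := by
  simp only [a_ksztaltna, a_ksztaltna_alt]
  have hfd : PySem.Int.floordiv n 2 = n / 2 :=
    PySem.Int.floordiv_eq_ediv_of_pos (by omega)
  rw [hfd]
  set h := n / 2 with hh
  have h1 : (PySem.List.pyRange 0 h 1).foldl (fun t i => t ++ [i]) []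
      = PySem.List.pyRange 0 h 1 := by
    rw [PySem.List.foldl_append_singleton]; simp
  rw [h1, guard_foldl_take]
  by_cases hn : n ≤ 0
  · -- n ≤ 0: everything is empty
    have hneg : h ≤ 0 := by omega
    rw [PySem.List.pyRange_one_eq_nil hneg, PySem.List.pyRange_one_eq_nil hn]
    have hz : (n - ((([] : List Int).length) : Int)).toNat = 0 := by
      simp; omega
    rw [hz]
    simp
  · -- n > 0
    have hn' : 0 < n := by omega
    have hh0 : 0 ≤ h := by omega
    have hbound : 2 * h ≤ n ∧ n ≤ 2 * h + 1 := by omega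
    rw [PySem.List.pyRange_one 0 h, PySem.List.pyRange_one 0 n, PySem.List.pyRange_neg_one h (-1)]
    apply List.ext_getElem
    · simp; omega
    · intro i hi1 hi2
      simp only [List.getElem_append, List.getElem_take, List.getElem_map,
        List.getElem_range, List.length_map, List.length_range]
      split_ifs with hc1 hc2 hc3 <;> simp_all <;> omega

-- ===== VERDICT (by name: the statement is the Claim_ definition above) =====
theorem a_ksztaltna_spec : Claim_equal_a_ksztaltna := by
  intro n _
  unfold Spec_a_ksztaltna
  exact a_ksztaltna_eq n
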